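-- pv_equiv track=rewrite | github.com/nahratzah/twitter_img_alt | twitter_img_alt.py | annotationsToStatuses
-- ===== SOURCE A (Python) =====
-- def annotationsToStatuses(annotations, maxlen):
--     # Prefix annotations with image index, if there are more than one images.
--     if len(annotations) > 1:
--         annotations = ['Image {0}:\n{1}'.format(idx, txt)
--             for (idx, txt) in zip(
--                 list(range(1, len(annotations) + 1)),
--                 [x for x in annotations])]
--
--     result = list()
--     for annot in annotations:
--         annot = annot.strip()
--         while len(annot) > maxlen:
--             split_idx = annot.rfind('\n', 0, maxlen + 1)
--             if split_idx == -1: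
--                 split_idx = annot.rfind(' ', 0, maxlen + 1)
--
--             if split_idx == -1: # Middle of word splitting.
--                 result.append(annot[:maxlen])
--                 annot = annot[maxlen:]
--             else: # Splitting across line break or word.
--                 result.append(annot[:split_idx])
--                 annot = annot[split_idx+1:]
--         result.append(annot)
--     return result
-- ===== SOURCE B (Python) =====
-- # One forward pass per annotation: track the last newline/space seen in the current
-- # window and cut when the window fills, instead of A's repeated backward rfind scans
-- # over a resliced remainder.
-- def annotationsToStatuses(annotations, maxlen):
--     if len(annotations) > 1:
--         annotations = ['Image {0}:\n{1}'.format(i, txt)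
--                        for i, txt in enumerate(annotations, 1)]
--     out = []
--     for annot in annotations:
--         text = annot.strip()
--         start = 0
--         last_nl = -1
--         last_sp = -1
--         for i in range(len(text)):
--             ch = text[i]
--             if ch == '\n':
--                 last_nl = i
--             elif ch == ' ':
--                 last_sp = i
--             if i == start + maxlen:
--                 if last_nl != -1:
--                     out.append(text[start:last_nl])
--                     start = last_nl + 1
--                 elif last_sp != -1:
--                     out.append(text[start:last_sp])
--                     start = last_sp + 1
--                 else:
--                     out.append(text[start:i])
--                     start = i
--                 last_nl = -1
--                 if last_sp < start:
--                     last_sp = -1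
--         out.append(text[start:])
--     return out
-- ===== Notes on version B (the rewrite author's own statement) =====
-- stated objective: alternative
-- what changed: B wraps each annotation in one forward pass that maintains the last newline/space index seen in the current window and cuts when the window fills, replacing A's loop of backward rfind scans over a freshly resliced remainder; numbering uses enumerate(annotations, 1) instead of zipping with an explicit range list.
import Mathlib
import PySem

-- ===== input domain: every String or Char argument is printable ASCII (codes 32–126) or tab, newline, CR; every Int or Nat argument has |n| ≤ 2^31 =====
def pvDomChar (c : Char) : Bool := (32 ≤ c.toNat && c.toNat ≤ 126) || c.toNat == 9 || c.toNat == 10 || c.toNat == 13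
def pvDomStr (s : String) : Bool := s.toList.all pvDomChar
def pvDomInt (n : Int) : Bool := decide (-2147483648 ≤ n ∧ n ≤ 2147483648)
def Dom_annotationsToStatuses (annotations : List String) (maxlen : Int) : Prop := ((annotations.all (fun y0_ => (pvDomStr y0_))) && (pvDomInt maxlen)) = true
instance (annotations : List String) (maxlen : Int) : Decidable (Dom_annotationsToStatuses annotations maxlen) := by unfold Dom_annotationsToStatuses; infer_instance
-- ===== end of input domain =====

-- B wraps each annotation in ONE forward pass, tracking the last newline/space seen in the
-- current window and cutting when the window fills, instead of A's repeated backward rfind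
-- over a resliced remainder.


-- ===== PORT A =====
-- the 'while len(annot) > maxlen' loop; fuel = len(annot)+1 suffices since each
-- iteration shortens annot by at least one character (maxlen ≥ 1 by Pre_)
def pvChunksA (fuel : Nat) (annot : List Char) (maxlen : Int) (result : List (List Char)) : List (List Char) :=
  match fuel with
  | 0 => result ++ [annot]
  | fuel + 1 =>
    if maxlen < (annot.length : Int) then
      let s0 := PySem.Chars.rfindFrom annot ['\n'] 0 (some (maxlen + 1))
      let si := if s0 = -1 then PySem.Chars.rfindFrom annot [' '] 0 (some (maxlen + 1)) else s0
      if si = -1 then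
        pvChunksA fuel (PySem.List.slice annot (some maxlen) none) maxlen
          (result ++ [PySem.List.slice annot none (some maxlen)])
      else
        pvChunksA fuel (PySem.List.slice annot (some (si + 1)) none) maxlen
          (result ++ [PySem.List.slice annot none (some si)])
    else result ++ [annot]

def annotationsToStatuses (annotations : List String) (maxlen : Int) : List String :=
  let annots := if 1 < annotations.length then
      ((PySem.List.pyRange 1 ((annotations.length : Int) + 1)).zip (annotations.map (fun x => x))).map
        (fun p => "Image " ++ PySem.Int.toStr p.1 ++ ":\n" ++ p.2)
    else annotations
  (annots.foldl (fun result annot =>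
      let a := PySem.Chars.strip annot.toList
      pvChunksA (a.length + 1) a maxlen result) []).map String.ofList

-- ===== PORT B =====
-- Source B's 'for i in range(len(text))' loop: rem = len(text) - i characters left to scan;
-- returns (start, out) as left after the loop. text.getD i ' ' is text[i], exact since
-- the loop only reads i < len(text).
def pvScanB (text : List Char) (maxlen : Int) :
    Nat → Nat → Int → Int → Int → List (List Char) → Int × List (List Char)
  | 0, _i, start, _lastNl, _lastSp, out => (start, out)
  | rem + 1, i, start, lastNl, lastSp, out =>
    let ch := text.getD i ' '
    let lastNl' := if ch = '\n' then (i : Int) else lastNl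
    let lastSp' := if ch = '\n' then lastSp else if ch = ' ' then (i : Int) else lastSp
    if (i : Int) = start + maxlen then
      if lastNl' ≠ -1 then
        pvScanB text maxlen rem (i + 1) (lastNl' + 1) (-1)
          (if lastSp' < lastNl' + 1 then -1 else lastSp')
          (out ++ [PySem.List.slice text (some start) (some lastNl')])
      else if lastSp' ≠ -1 then
        pvScanB text maxlen rem (i + 1) (lastSp' + 1) (-1) (-1)
          (out ++ [PySem.List.slice text (some start) (some lastSp')])
      else
        pvScanB text maxlen rem (i + 1) (i : Int) (-1) (-1)
          (out ++ [PySem.List.slice text (some start) (some (i : Int))])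
    else pvScanB text maxlen rem (i + 1) start lastNl' lastSp' out

def annotationsToStatuses_alt (annotations : List String) (maxlen : Int) : List String :=
  let annots := if 1 < annotations.length then
      (annotations.zipIdx 1).map (fun p => "Image " ++ PySem.Int.toStr (p.2 : Int) ++ ":\n" ++ p.1)
    else annotations
  (annots.foldl (fun out annot =>
      let t := PySem.Chars.strip annot.toList
      let p := pvScanB t maxlen t.length 0 0 (-1) (-1) out
      p.2 ++ [PySem.List.slice t (some p.1) none]) []).map String.ofList

-- ===== PRECONDITION & SPEC =====
-- For maxlen ≤ 0 the slicing loop makes no progress and A diverges, except when the loop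
-- is never entered: an empty annotation list, or maxlen = 0 with a single annotation that
-- strips to the empty string. Pre_ admits exactly the inputs on which A returns.
def Pre_annotationsToStatuses (annotations : List String) (maxlen : Int) : Prop :=
  1 ≤ maxlen ∨ annotations = [] ∨
    (maxlen = 0 ∧ annotations.length ≤ 1 ∧ ∀ a ∈ annotations, PySem.Chars.strip a.toList = [])
instance (annotations : List String) (maxlen : Int) : Decidable (Pre_annotationsToStatuses annotations maxlen) := by unfold Pre_annotationsToStatuses; infer_instance
def pvWitness_annotationsToStatuses : List String × Int := (["hello world this is a test"], 10)
def Spec_annotationsToStatuses (annotations : List String) (maxlen : Int) (out : List String) : Prop := out = annotationsToStatuses_alt annotations maxlen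
instance (annotations : List String) (maxlen : Int) (out : List String) : Decidable (Spec_annotationsToStatuses annotations maxlen out) := by unfold Spec_annotationsToStatuses; infer_instance

-- ===== CLAIM (what is proved, stated in full; the proofs are below) =====
def Claim_equal_annotationsToStatuses : Prop := ∀ (annotations : List String) (maxlen : Int), Dom_annotationsToStatuses annotations maxlen → Pre_annotationsToStatuses annotations maxlen → Spec_annotationsToStatuses annotations maxlen (annotationsToStatuses annotations maxlen)

-- ===== LEMMAS AND PROOFS =====

-- 'v is the index of the last occurrence of c in cs on [lo, hi), or -1 if none'
def pvIsLast (cs : List Char) (c : Char) (lo hi : Nat) (v : Int) : Prop :=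
  (v = -1 ∧ ∀ j, lo ≤ j → j < hi → cs.getD j ' ' ≠ c) ∨
  (∃ k : Nat, v = (k : Int) ∧ lo ≤ k ∧ k < hi ∧ cs.getD k ' ' = c ∧
    ∀ j, k < j → j < hi → cs.getD j ' ' ≠ c)

lemma pvIsLast_unique {cs c lo hi v v'} (h : pvIsLast cs c lo hi v)
    (h' : pvIsLast cs c lo hi v') : v = v' := by
  rcases h with ⟨hv, hn⟩ | ⟨k, hv, hk1, hk2, hk3, hk4⟩ <;>
    rcases h' with ⟨hv', hn'⟩ | ⟨k', hv', hk1', hk2', hk3', hk4'⟩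
  · omega
  · exact absurd hk3' (hn _ hk1' hk2')
  · exact absurd hk3 (hn' _ hk1 hk2)
  · rcases Nat.lt_trichotomy k k' with h | h | h
    · exact absurd hk3' (hk4 _ h hk2')
    · omega
    · exact absurd hk3 (hk4' _ h hk2)

lemma pvIsLast_succ {cs c lo i v} (h : pvIsLast cs c lo i v) (hlo : lo ≤ i) :
    pvIsLast cs c lo (i + 1) (if cs.getD i ' ' = c then (i : Int) else v) := by
  by_cases hc : cs.getD i ' ' = c
  · exact Or.inr ⟨i, by rw [if_pos hc], hlo, by omega, hc, fun j h1 h2 => absurd h1 (by omega)⟩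
  · rw [if_neg hc]
    rcases h with ⟨hv, hn⟩ | ⟨k, hv, hk1, hk2, hk3, hk4⟩
    · refine Or.inl ⟨hv, fun j h1 h2 => ?_⟩
      rcases Nat.lt_or_ge j i with h | h
      · exact hn _ h1 h
      · have : j = i := by omega
        subst this; exact hc
    · refine Or.inr ⟨k, hv, hk1, by omega, hk3, fun j h1 h2 => ?_⟩
      rcases Nat.lt_or_ge j i with h | h
      · exact hk4 _ h1 h
      · have : j = i := by omega
        subst this; exact hc

-- cut at the last occurrence k: nothing of c remains in (k, hi)
lemma pvIsLast_cut {cs c lo hi} {k : Nat} (h : pvIsLast cs c lo hi (k : Int)) :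
    pvIsLast cs c (k + 1) hi (-1) := by
  rcases h with ⟨hv, _⟩ | ⟨k', hv, _, _, _, hk4⟩
  · omega
  · exact Or.inl ⟨rfl, fun j h1 h2 => hk4 _ (by omega) h2⟩

-- raising the lower bound past v gives -1
lemma pvIsLast_drop {cs c lo hi v} {lo' : Nat} (h : pvIsLast cs c lo hi v)
    (hlo : lo ≤ lo') (hv : v < (lo' : Int)) : pvIsLast cs c lo' hi (-1) := by
  rcases h with ⟨hv', hn⟩ | ⟨k, hv', hk1, hk2, hk3, hk4⟩
  · exact Or.inl ⟨rfl, fun j h1 h2 => hn _ (by omega) h2⟩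
  · exact Or.inl ⟨rfl, fun j h1 h2 => hk4 _ (by omega) h2⟩

-- raising the lower bound not past the witness keeps it
lemma pvIsLast_mono {cs c lo hi} {k : Nat} {lo' : Nat} (h : pvIsLast cs c lo hi (k : Int))
    (hlo : lo' ≤ k) : pvIsLast cs c lo' hi (k : Int) := by
  rcases h with ⟨hv, _⟩ | ⟨k', hv, _, hk2, hk3, hk4⟩
  · omega
  · have hkk : k = k' := by omega
    exact Or.inr ⟨k, rfl, hlo, by omega, by rw [hkk]; exact hk3,
      fun j h1 h2 => hk4 _ (by omega) h2⟩

-- [c] is a prefix of s.drop j iff s has c at j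
lemma pv_prefix_single (s : List Char) (c : Char) (j : Nat) :
    [c].isPrefixOf (s.drop j) = true ↔ j < s.length ∧ s.getD j ' ' = c := by
  rw [List.isPrefixOf_iff_prefix]
  rcases hd : s.drop j with _ | ⟨a, t⟩
  · have hlen : s.length ≤ j := by
      have := congrArg List.length hd
      simp only [List.length_drop, List.length_nil] at this
      omega
    simp only [List.prefix_nil]
    constructor
    · intro h; cases h
    · intro ⟨h, _⟩; omega
  · have hlen : j < s.length := by
      have := congrArg List.length hd
      simp only [List.length_drop, List.length_cons] at this
      omega
    have hget : s.getD j ' ' = a := by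
      have h2 : s[j]? = some a := by
        rw [show j = j + 0 from rfl, ← List.getElem?_drop, hd]
        rfl
      simp [List.getD, h2]
    constructor
    · intro h
      rcases h with ⟨t', ht'⟩
      refine ⟨hlen, ?_⟩
      rw [hget]
      exact (List.cons.injEq _ _ _ _ ▸ ht' : c = a ∧ _).1.symm
    · intro ⟨_, h⟩
      have hac : a = c := by rw [← hget, h]
      exact ⟨t, by rw [hac]; rfl⟩

-- rfind on a singleton pattern finds the last occurrence
lemma pv_go_spec (s : List Char) (c : Char) (j : Nat) :
    pvIsLast s c 0 (min (j + 1) s.length) (PySem.Chars.rfind.go s [c] j) := by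
  induction j with
  | zero =>
    by_cases h : [c].isPrefixOf s
    · have hp := (pv_prefix_single s c 0).mp (by simpa using h)
      refine Or.inr ⟨0, by simp [PySem.Chars.rfind.go, h], le_refl _, by omega, hp.2,
        fun j h1 h2 => absurd h1 (by omega)⟩
    · refine Or.inl ⟨by simp [PySem.Chars.rfind.go, h], ?_⟩
      intro j h1 h2 hc
      have hj : j = 0 := by omega
      subst hj
      exact h (by simpa using (pv_prefix_single s c 0).mpr ⟨by omega, hc⟩)
  | succ j ih =>
    by_cases h : [c].isPrefixOf (s.drop (j + 1))
    · have hp := (pv_prefix_single s c (j + 1)).mp h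
      refine Or.inr ⟨j + 1, by simp [PySem.Chars.rfind.go, h], by omega, by omega, hp.2,
        fun j' h1 h2 => absurd h1 (by omega)⟩
    · rw [show PySem.Chars.rfind.go s [c] (j + 1) = PySem.Chars.rfind.go s [c] j from by
          simp [PySem.Chars.rfind.go, h]]
      rcases Nat.lt_or_ge (j + 1) s.length with hlt | hle
      · have hne : s.getD (j + 1) ' ' ≠ c := fun hc =>
          h ((pv_prefix_single s c (j + 1)).mpr ⟨hlt, hc⟩)
        rw [show min (j + 1) s.length = j + 1 from by omega] at ih
        rw [show min (j + 1 + 1) s.length = j + 1 + 1 from by omega]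
        have h2 := pvIsLast_succ ih (Nat.zero_le _)
        rwa [if_neg hne] at h2
      · rw [show min (j + 1 + 1) s.length = min (j + 1) s.length from by omega]
        exact ih

lemma pv_rfind_spec (s : List Char) (c : Char) :
    pvIsLast s c 0 s.length (PySem.Chars.rfind s [c]) := by
  have h := pv_go_spec s c s.length
  rw [show min (s.length + 1) s.length = s.length from by omega] at h
  simpa [PySem.Chars.rfind] using h

-- A-side window: rfind(sub, 0, m+1) on s is rfind on the first (m+1) characters
lemma pv_rfindFrom_zero (s sub : List Char) (m : Int) (hm : 0 ≤ m) :
    PySem.Chars.rfindFrom s sub 0 (some (m + 1)) =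
      PySem.Chars.rfind (s.take (m + 1).toNat) sub := by
  simp only [PySem.Chars.rfindFrom]
  split_ifs <;>
    simp only [Int.toNat_zero, List.drop_zero, Int.toNat_natCast, List.take_length] at * <;>
    first
      | omega
      | ((rw [List.take_of_length_le (by omega : s.length ≤ (m + 1).toNat)] at *) <;> omega)

-- the rfind of A's window, shifted to an absolute index, is the last occurrence on [s, i)
lemma pv_window_isLast (cs : List Char) (c : Char) (s i : Nat) (hs : s ≤ i) (hi : i ≤ cs.length) :
    pvIsLast cs c s i
      (if PySem.Chars.rfind ((cs.drop s).take (i - s)) [c] = -1 then -1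
       else (s : Int) + PySem.Chars.rfind ((cs.drop s).take (i - s)) [c]) := by
  have hw := pv_rfind_spec ((cs.drop s).take (i - s)) c
  have hlen : ((cs.drop s).take (i - s)).length = i - s := by
    simp only [List.length_take, List.length_drop]
    omega
  have hgd : ∀ t : Nat, t < i - s →
      ((cs.drop s).take (i - s)).getD t ' ' = cs.getD (s + t) ' ' := by
    intro t ht
    have he : ((cs.drop s).take (i - s))[t]? = cs[s + t]? := by
      rw [List.getElem?_take_of_lt ht, List.getElem?_drop]
    simp [List.getD, he]
  rw [hlen] at hw
  rcases hw with ⟨hv, hn⟩ | ⟨k, hv, _, hk2, hk3, hk4⟩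
  · rw [if_pos hv]
    refine Or.inl ⟨rfl, fun j h1 h2 hc => ?_⟩
    have hh := hn (j - s) (by omega) (by omega)
    rw [hgd _ (by omega), show s + (j - s) = j from by omega] at hh
    exact hh hc
  · rw [hv, if_neg (by omega)]
    refine Or.inr ⟨s + k, by push_cast; ring, by omega, by omega, ?_, ?_⟩
    · rw [← hgd k (by omega)]
      exact hk3
    · intro j h1 h2 hc
      have hh := hk4 (j - s) (by omega) (by omega)
      rw [hgd _ (by omega), show s + (j - s) = j from by omega] at hh
      exact hh hc

-- what A's windowed rfind returns, in terms of the tracker value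
lemma pv_tracker_eq_window (cs : List Char) (c : Char) (s i : Nat) (hs : s ≤ i)
    (hi : i ≤ cs.length) {v : Int} (h : pvIsLast cs c s i v) :
    PySem.Chars.rfind ((cs.drop s).take (i - s)) [c] = (if v = -1 then -1 else v - s) ∧
    (v = -1 ∨ ((s : Int) ≤ v ∧ v < (i : Int))) := by
  have hw := pv_window_isLast cs c s i hs hi
  have hu := pvIsLast_unique h hw
  rcases pv_rfind_spec ((cs.drop s).take (i - s)) c with ⟨hv, _⟩ | ⟨k, hv, _, hk2, _, _⟩
  · rw [hv] at hu
    simp only [reduceIte] at hu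
    rw [hv, hu]
    norm_num
  · have hlen : ((cs.drop s).take (i - s)).length = i - s := by
      simp only [List.length_take, List.length_drop]
      omega
    rw [hlen] at hk2
    rw [hv] at hu ⊢
    rw [if_neg (by omega)] at hu
    constructor
    · rw [if_neg (by omega), hu]
      omega
    · right
      omega

-- the port's absolute-index chunk is A's relative-index chunk
lemma pv_slice_abs (cs : List Char) (s : Nat) (v : Int) (hv : (s : Int) ≤ v) :
    PySem.List.slice cs (some (s : Int)) (some v) =
      PySem.List.slice (cs.drop s) none (some (v - (s : Int))) := by
  rw [PySem.List.slice_toNat _ (by omega) (by omega), PySem.List.slice_to _ (by omega)]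
  simp only [Int.toNat_natCast]
  congr 1
  omega

-- pvChunksA only appends to its accumulator
lemma pv_chunksA_acc (fuel : Nat) (t : List Char) (m : Int) (acc : List (List Char)) :
    pvChunksA fuel t m acc = acc ++ pvChunksA fuel t m [] := by
  induction fuel generalizing t acc with
  | zero => simp [pvChunksA]
  | succ fuel ih =>
    simp only [pvChunksA]
    split_ifs <;>
      first
        | (conv_lhs => rw [ih]) <;> (conv_rhs => rw [ih]) <;> simp
        | simp

-- a short-enough annotation is emitted whole, whatever the fuel
lemma pv_chunksA_short (fuel : Nat) (t : List Char) (m : Int) (h : (t.length : Int) ≤ m) :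
    pvChunksA fuel t m [] = [t] := by
  cases fuel <;> simp [pvChunksA] <;> omega

-- MAIN: B's forward scan equals A's rfind-and-reslice loop
lemma pv_scan_eq (cs : List Char) (m : Int) (hm : 1 ≤ m) :
    ∀ (rem i s : Nat) (lastNl lastSp : Int) (out : List (List Char)) (fa : Nat),
      i + rem = cs.length → s ≤ i → (i : Int) ≤ (s : Int) + m →
      pvIsLast cs '\n' s i lastNl → pvIsLast cs ' ' s i lastSp →
      cs.length - s < fa →
      (pvScanB cs m rem i (s : Int) lastNl lastSp out).2 ++
          [PySem.List.slice cs (some (pvScanB cs m rem i (s : Int) lastNl lastSp out).1) none]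
        = out ++ pvChunksA fa (cs.drop s) m [] := by
  intro rem
  induction rem with
  | zero =>
    intro i s lastNl lastSp out fa h1 h2 h3 hNl hSp hfa
    simp only [pvScanB]
    rw [PySem.List.slice_from_natCast,
        pv_chunksA_short fa (cs.drop s) m (by simp only [List.length_drop]; omega)]
  | succ rem ih =>
    intro i s lastNl lastSp out fa h1 h2 h3 hNl hSp hfa
    simp only [pvScanB]
    set nl' := (if cs.getD i ' ' = '\n' then (i : Int) else lastNl) with hnl
    set sp' := (if cs.getD i ' ' = '\n' then lastSp
        else if cs.getD i ' ' = ' ' then (i : Int) else lastSp) with hsp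
    have hNl' : pvIsLast cs '\n' s (i + 1) nl' := by
      rw [hnl]; exact pvIsLast_succ hNl h2
    have hSp' : pvIsLast cs ' ' s (i + 1) sp' := by
      rw [hsp]
      by_cases hch : cs.getD i ' ' = '\n'
      · rw [if_pos hch]
        have h0 := pvIsLast_succ (c := ' ') hSp h2
        rwa [if_neg (by rw [hch]; decide)] at h0
      · rw [if_neg hch]
        exact pvIsLast_succ hSp h2
    by_cases hcut : (i : Int) = (s : Int) + m
    case neg =>
      rw [if_neg hcut]
      exact ih (i + 1) s nl' sp' out fa (by omega) (by omega) (by omega) hNl' hSp' hfa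
    rw [if_pos hcut]
    have hwN := pv_tracker_eq_window cs '\n' s (i + 1) (by omega) (by omega) hNl'
    have hwS := pv_tracker_eq_window cs ' ' s (i + 1) (by omega) (by omega) hSp'
    cases fa with
    | zero => omega
    | succ fb =>
    simp only [pvChunksA]
    rw [if_pos (show m < ((cs.drop s).length : Int) by
          simp only [List.length_drop]; omega)]
    rw [pv_rfindFrom_zero (cs.drop s) ['\n'] m (by omega),
        pv_rfindFrom_zero (cs.drop s) [' '] m (by omega),
        show (m + 1).toNat = (i + 1) - s from by omega,
        hwN.1, hwS.1]
    by_cases hN : nl' = -1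
    case neg =>
      -- split at the newline
      have hbN : (s : Int) ≤ nl' ∧ nl' < ((i : Nat) : Int) + 1 := by
        rcases hwN.2 with h | h
        · exact absurd h hN
        · push_cast at h ⊢; omega
      rw [if_pos hN, if_neg hN]
      have hcond : (nl' - (s : Int) = -1) = False := by
        simp only [eq_iff_iff, iff_false]
        omega
      simp only [hcond, if_false]
      rw [List.nil_append, pv_chunksA_acc, ← pv_slice_abs cs s nl' (by omega)]
      have hrest : PySem.List.slice (cs.drop s) (some (nl' - (s : Int) + 1)) none
          = cs.drop (nl'.toNat + 1) := by
        rw [PySem.List.slice_from _ (by omega), List.drop_drop]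
        congr 1
        omega
      rw [hrest, show nl' + 1 = (((nl'.toNat + 1 : Nat)) : Int) from by omega]
      have hk : nl' = ((nl'.toNat : Nat) : Int) := by omega
      have hsp'' : pvIsLast cs ' ' (nl'.toNat + 1) (i + 1)
          (if sp' < (((nl'.toNat + 1 : Nat)) : Int) then -1 else sp') := by
        by_cases hlt : sp' < (((nl'.toNat + 1 : Nat)) : Int)
        · rw [if_pos hlt]
          exact pvIsLast_drop hSp' (by omega) (by omega)
        · rw [if_neg hlt]
          have hsk : sp' = ((sp'.toNat : Nat) : Int) := by omega
          rw [hsk]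
          exact pvIsLast_mono (hsk ▸ hSp') (by omega)
      have hnl'' : pvIsLast cs '\n' (nl'.toNat + 1) (i + 1) (-1) :=
        pvIsLast_cut (hk ▸ hNl')
      have happ := ih (i + 1) (nl'.toNat + 1) (-1)
        (if sp' < (((nl'.toNat + 1 : Nat)) : Int) then -1 else sp')
        (out ++ [PySem.List.slice cs (some (s : Int)) (some nl')]) fb
        (by omega) (by omega) (by push_cast; omega) hnl'' hsp'' (by omega)
      rw [happ, List.append_assoc]
    rw [if_neg (show ¬ (nl' ≠ -1) by simp [hN]), if_pos hN,
        if_pos (show (-1 : Int) = -1 from rfl)]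
    by_cases hS : sp' = -1
    case neg =>
      -- split at the space
      have hbS : (s : Int) ≤ sp' ∧ sp' < ((i : Nat) : Int) + 1 := by
        rcases hwS.2 with h | h
        · exact absurd h hS
        · push_cast at h ⊢; omega
      rw [if_pos hS, if_neg hS]
      have hcond : (sp' - (s : Int) = -1) = False := by
        simp only [eq_iff_iff, iff_false]
        omega
      simp only [hcond, if_false]
      rw [List.nil_append, pv_chunksA_acc, ← pv_slice_abs cs s sp' (by omega)]
      have hrest : PySem.List.slice (cs.drop s) (some (sp' - (s : Int) + 1)) none
          = cs.drop (sp'.toNat + 1) := by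
        rw [PySem.List.slice_from _ (by omega), List.drop_drop]
        congr 1
        omega
      rw [hrest, show sp' + 1 = (((sp'.toNat + 1 : Nat)) : Int) from by omega]
      have hsk : sp' = ((sp'.toNat : Nat) : Int) := by omega
      have hsp'' : pvIsLast cs ' ' (sp'.toNat + 1) (i + 1) (-1) :=
        pvIsLast_cut (hsk ▸ hSp')
      have hnl'' : pvIsLast cs '\n' (sp'.toNat + 1) (i + 1) (-1) :=
        pvIsLast_drop hNl' (by omega) (by omega)
      have happ := ih (i + 1) (sp'.toNat + 1) (-1) (-1)
        (out ++ [PySem.List.slice cs (some (s : Int)) (some sp')]) fb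
        (by omega) (by omega) (by push_cast; omega) hnl'' hsp'' (by omega)
      rw [happ, List.append_assoc]
    -- middle-of-word split
    rw [if_neg (show ¬ (sp' ≠ -1) by simp [hS]), if_pos hS,
        if_pos (show (-1 : Int) = -1 from rfl)]
    rw [List.nil_append, pv_chunksA_acc]
    have hchunk : PySem.List.slice (cs.drop s) none (some m)
        = PySem.List.slice cs (some (s : Int)) (some ((i : Nat) : Int)) := by
      rw [show m = (i : Int) - (s : Int) from by omega,
          ← pv_slice_abs cs s ((i : Nat) : Int) (by omega)]
    have hrest : PySem.List.slice (cs.drop s) (some m) none = cs.drop i := by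
      rw [PySem.List.slice_from _ (by omega), List.drop_drop]
      congr 1
      omega
    rw [hchunk, hrest]
    have hnl'' : pvIsLast cs '\n' i (i + 1) (-1) :=
      pvIsLast_drop hNl' (by omega) (by omega)
    have hsp'' : pvIsLast cs ' ' i (i + 1) (-1) :=
      pvIsLast_drop hSp' (by omega) (by omega)
    have happ := ih (i + 1) i (-1) (-1)
      (out ++ [PySem.List.slice cs (some (s : Int)) (some ((i : Nat) : Int))]) fb
      (by omega) (by omega) (by omega) hnl'' hsp'' (by omega)
    rw [happ, List.append_assoc]

-- the numbering prefix: zip with range(1, n+1) = enumerate(…, 1)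
lemma pv_numbering (xs : List String) (k : Nat) :
    ((PySem.List.pyRange (k : Int) ((k : Int) + xs.length)).zip (xs.map (fun x => x))).map
        (fun p => "Image " ++ PySem.Int.toStr p.1 ++ ":\n" ++ p.2) =
      (xs.zipIdx k).map (fun p => "Image " ++ PySem.Int.toStr (p.2 : Int) ++ ":\n" ++ p.1) := by
  induction xs generalizing k with
  | nil => simp [PySem.List.pyRange]
  | cons x xs ih =>
    rw [PySem.List.pyRange_one_cons (by push_cast [List.length_cons]; omega)]
    simp only [List.map_cons, List.zip_cons_cons, List.zipIdx_cons, List.map_cons]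
    rw [show (k : Int) + ((x :: xs).length : Int) = ((k + 1 : Nat) : Int) + (xs.length : Int)
          from by push_cast [List.length_cons]; ring,
        show (k : Int) + 1 = ((k + 1 : Nat) : Int) from by push_cast; ring,
        ih (k + 1)]

lemma pv_numbering_one (xs : List String) :
    ((PySem.List.pyRange 1 ((xs.length : Int) + 1)).zip (xs.map (fun x => x))).map
        (fun p => "Image " ++ PySem.Int.toStr p.1 ++ ":\n" ++ p.2) =
      (xs.zipIdx 1).map (fun p => "Image " ++ PySem.Int.toStr (p.2 : Int) ++ ":\n" ++ p.1) := by
  have h := pv_numbering xs 1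
  rw [Nat.cast_one, add_comm (1 : Int) (xs.length : Int)] at h
  exact h

-- ===== VERDICT (by name: the statement is the Claim_ definition above) =====
theorem annotationsToStatuses_spec : Claim_equal_annotationsToStatuses := by
  intro annotations maxlen _ hpre
  rcases hpre with hpre | hnil | ⟨h0, hlen1, hempty⟩
  case inr.inl =>
    subst hnil; rfl
  case inr.inr =>
    subst h0
    match annotations, hlen1 with
    | [], _ => rfl
    | [a], _ =>
      have ha := hempty a (List.mem_singleton.mpr rfl)
      unfold Spec_annotationsToStatuses annotationsToStatuses annotationsToStatuses_alt
      simp [ha, pvChunksA, pvScanB, PySem.List.slice]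
  unfold Spec_annotationsToStatuses annotationsToStatuses annotationsToStatuses_alt
  have hfun : (fun (result : List (List Char)) (annot : String) =>
        let a := PySem.Chars.strip annot.toList
        pvChunksA (a.length + 1) a maxlen result) =
      (fun (out : List (List Char)) (annot : String) =>
        let t := PySem.Chars.strip annot.toList
        let p := pvScanB t maxlen t.length 0 0 (-1) (-1) out
        p.2 ++ [PySem.List.slice t (some p.1) none]) := by
    funext res annot
    have h := pv_scan_eq (PySem.Chars.strip annot.toList) maxlen hpre
      (PySem.Chars.strip annot.toList).length 0 0 (-1) (-1) res
      ((PySem.Chars.strip annot.toList).length + 1) (by omega) (by omega) (by omega)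
      (Or.inl ⟨rfl, by omega⟩) (Or.inl ⟨rfl, by omega⟩) (by omega)
    simp only [Nat.cast_zero] at h
    rw [show (PySem.Chars.strip annot.toList).drop 0 = PySem.Chars.strip annot.toList
          from List.drop_zero] at h
    show pvChunksA ((PySem.Chars.strip annot.toList).length + 1)
        (PySem.Chars.strip annot.toList) maxlen res = _
    rw [pv_chunksA_acc]
    exact h.symm
  by_cases hlen : 1 < annotations.length
  · simp only [if_pos hlen]
    rw [hfun, pv_numbering_one annotations]
  · simp only [if_neg hlen]
    rw [hfun]
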